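-- pv_equiv track=rewrite | github.com/k-harada/game_test | othello.py | reverse_line
-- ===== SOURCE A (Python) =====
-- def reverse_line(line, i, black):
--
--     line_new = [k for k in line]
--     line_new[i] = black
--     res = 0
--
--     # forward
--     for j in range(i + 1, len(line_new)):
--         if line_new[j] == black:
--             for k in range(i + 1, j):
--                 line_new[k] = black
--                 res += 1
--             break
--         elif line_new[j] == 0:
--             break
--
--     # backward
--     for j in range(i - 1, -1, -1):
--         if line_new[j] == black:
--             for k in range(j + 1, i):
--                 line_new[k] = black
--                 res += 1
--             break
--         elif line_new[j] == 0:
--             break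
--
--     return line_new, res
-- ===== SOURCE B (Python) =====
-- def reverse_line(line, i, black):
--     # Locate-then-bulk-assign: no outward walking loops. For each side, the
--     # number of flipped cells is the distance to the nearest own-colour piece,
--     # unless an empty cell sits in between; the flip itself is one slice
--     # assignment of [black]*gain.
--     out = list(line)
--     out[i] = black
--
--     def gain(seg):
--         if black not in seg:
--             return 0
--         b = seg.index(black)
--         return 0 if 0 in seg[:b] else b
--
--     f = gain(out[i + 1:])
--     g = gain(out[:i][::-1])
--     out[i + 1:i + 1 + f] = [black] * f
--     out[i - g:i] = [black] * g
--     return out, f + g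
-- ===== Notes on version B (the rewrite author's own statement) =====
-- stated objective: alternative
-- what changed: A's two outward scan-with-break loops, each followed by a second refill loop over the same range, are replaced by locate-then-bulk-assign: per side the flip count is computed once from membership, .index of the nearest own-colour piece and an emptiness check of the cells in between, and the flip is a single slice assignment of [black]*gain.
-- outside the precondition, e.g. on reverse_line([-1, -1], -2, 1): A returns ([1, 1], 1), B returns ([1, -1], 0)
import Mathlib
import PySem

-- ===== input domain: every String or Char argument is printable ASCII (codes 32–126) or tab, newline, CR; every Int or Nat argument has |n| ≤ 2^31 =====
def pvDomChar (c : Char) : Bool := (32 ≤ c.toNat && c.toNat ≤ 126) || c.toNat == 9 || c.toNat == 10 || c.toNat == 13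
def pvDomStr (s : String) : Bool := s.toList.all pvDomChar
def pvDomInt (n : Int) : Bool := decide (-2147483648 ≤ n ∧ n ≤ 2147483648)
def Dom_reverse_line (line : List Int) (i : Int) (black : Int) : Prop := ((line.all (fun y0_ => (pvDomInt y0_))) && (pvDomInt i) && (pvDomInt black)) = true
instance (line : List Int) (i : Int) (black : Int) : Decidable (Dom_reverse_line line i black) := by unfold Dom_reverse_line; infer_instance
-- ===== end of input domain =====

-- B replaces A's outward scan-with-break-then-refill loops by locate-then-bulk-assign:
-- per side, find the nearest own-colour piece with membership + index, reject it if an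
-- empty cell sits in between, and flip with a single slice assignment (objective:
-- alternative decomposition, same cost).

-- ===== PORT A =====
-- inner refill loop 'for k in range(lo, hi): line_new[k] = black; res += 1' on the state (line_new, res)
def pvFillA (black lo hi : Int) (st : List Int × Int) : List Int × Int :=
  (PySem.List.pyRange lo hi 1).foldl (fun p k => (PySem.List.pySetD p.1 k black, p.2 + 1)) st

-- forward 'for j in range(i+1, len(line_new))' with its two breaks
def pvFwdA (i black : Int) (js : List Int) (st : List Int × Int) : List Int × Int :=
  match js with
  | [] => st
  | j :: rest =>
    let v := PySem.List.pyGetD st.1 j 0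
    if v = black then pvFillA black (i + 1) j st
    else if v = 0 then st
    else pvFwdA i black rest st

-- backward 'for j in range(i-1, -1, -1)' with its two breaks
def pvBwdA (i black : Int) (js : List Int) (st : List Int × Int) : List Int × Int :=
  match js with
  | [] => st
  | j :: rest =>
    let v := PySem.List.pyGetD st.1 j 0
    if v = black then pvFillA black (j + 1) i st
    else if v = 0 then st
    else pvBwdA i black rest st

def reverse_line (line : List Int) (i : Int) (black : Int) : List Int × Int :=
  let line_new := line.map (fun k => k)
  let line_new := PySem.List.pySetD line_new i black
  let st := pvFwdA i black (PySem.List.pyRange (i + 1) (line_new.length : Int) 1) (line_new, 0)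
  pvBwdA i black (PySem.List.pyRange (i - 1) (-1) (-1)) st

-- ===== PORT B =====
-- 'gain(seg)': nearest own-colour distance via membership + index, rejected if 0 in between
def pvGainB (black : Int) (seg : List Int) : Int :=
  if black ∈ seg then
    let b := (PySem.List.index? seg black).getD 0
    if (0 : Int) ∈ PySem.List.slice seg none (some (b : Int)) then 0 else (b : Int)
  else 0

-- slice assignment 'xs[a:b] = vals' (step-1 slice; exact Python semantics: the slice's
-- resolved [start, stop) window, stop clamped up to start, is replaced by vals)
def pvSetSlice (xs : List Int) (a b : Int) (vals : List Int) : List Int :=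
  let A := PySem.List.clampIdx xs.length a
  let B := max A (PySem.List.clampIdx xs.length b)
  xs.take A ++ vals ++ xs.drop B

def reverse_line_alt (line : List Int) (i : Int) (black : Int) : List Int × Int :=
  let out := PySem.List.pySetD line i black
  let f := pvGainB black (PySem.List.slice out (some (i + 1)) none)
  let g := pvGainB black (((PySem.List.slice? (PySem.List.slice out none (some i)) none none (-1)).getD []))
  let out := pvSetSlice out (i + 1) (i + 1 + f) (List.replicate f.toNat black)
  let out := pvSetSlice out (i - g) i (List.replicate g.toNat black)
  (out, f + g)

-- ===== PRECONDITION & SPEC =====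
-- Pre_ excludes indices i outside [0, len(line)): for i ≥ len or i < -len A raises
-- IndexError, and for -len ≤ i < 0 both programs return accidental, unspecified
-- values produced by negative-index wraparound on a board line (no Othello caller
-- passes a negative position), values neither program is obliged to match.
def Pre_reverse_line (line : List Int) (i : Int) (black : Int) : Prop :=
  0 ≤ i ∧ i < (line.length : Int)
instance (line : List Int) (i : Int) (black : Int) : Decidable (Pre_reverse_line line i black) := by
  unfold Pre_reverse_line; infer_instance

def pvWitness_reverse_line : List Int × Int × Int := ([1, -1, 1], 1, 1)

def Spec_reverse_line (line : List Int) (i : Int) (black : Int) (out : List Int × Int) : Prop := out = reverse_line_alt line i black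
instance (line : List Int) (i : Int) (black : Int) (out : List Int × Int) : Decidable (Spec_reverse_line line i black out) := by unfold Spec_reverse_line; infer_instance

-- ===== CLAIM (what is proved, stated in full; the proofs are below) =====
def Claim_equal_reverse_line : Prop := ∀ (line : List Int) (i : Int) (black : Int), Dom_reverse_line line i black → Pre_reverse_line line i black → Spec_reverse_line line i black (reverse_line line i black)

-- ===== LEMMAS AND PROOFS =====

-- recursive characterization of gain: distance to the first 'black' cell, none if an
-- empty (or no) cell comes first
def pvGain? (black : Int) : List Int → Option Nat
  | [] => none
  | v :: t =>
    if v = black then some 0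
    else if v = 0 then none
    else (pvGain? black t).map (· + 1)

theorem pvGain?_some (black : Int) (seg : List Int) :
    ∀ b : Nat, PySem.List.index? seg black = some b →
    pvGain? black seg = if (0 : Int) ∈ seg.take b then none else some b := by
  induction seg with
  | nil => intro b h; simp [PySem.List.index?] at h
  | cons v t ih =>
    intro b h
    by_cases hv : v = black
    · subst hv
      rw [PySem.List.index?_cons_self] at h
      cases h
      simp [pvGain?]
    · rw [PySem.List.index?_cons_of_ne t hv] at h
      rcases Option.map_eq_some_iff.mp h with ⟨b', hb', rfl⟩
      by_cases h0 : v = 0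
      · subst h0
        simp [pvGain?, hv, List.take_succ_cons]
      · rw [show pvGain? black (v :: t) = (pvGain? black t).map (· + 1) by
          simp [pvGain?, hv, h0]]
        rw [ih b' hb']
        simp [List.take_succ_cons, Ne.symm h0]
        by_cases hm : (0 : Int) ∈ t.take b' <;> simp [hm]

theorem pvGain?_none (black : Int) (seg : List Int) (h : black ∉ seg) :
    pvGain? black seg = none := by
  induction seg with
  | nil => rfl
  | cons v t ih =>
    simp at h
    simp [pvGain?, Ne.symm h.1, ih h.2]

theorem pvGain?_lt (black : Int) (seg : List Int) :
    ∀ b : Nat, pvGain? black seg = some b → b < seg.length := by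
  induction seg with
  | nil => intro b h; simp [pvGain?] at h
  | cons v t ih =>
    intro b h
    unfold pvGain? at h
    split_ifs at h with h1 h2
    · cases h; simp
    · rcases Option.map_eq_some_iff.mp h with ⟨b', hb', rfl⟩
      have := ih b' hb'
      simp; omega

theorem pvGainB_eq (black : Int) (seg : List Int) :
    pvGainB black seg = (pvGain? black seg).elim (0 : Int) (fun b => (b : Int)) := by
  unfold pvGainB
  by_cases hm : black ∈ seg
  · rcases Option.isSome_iff_exists.mp ((PySem.List.index?_isSome_iff seg black).mpr hm) with ⟨b, hb⟩
    rw [pvGain?_some black seg b hb]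
    simp only [hm, if_true, hb, Option.getD_some, PySem.List.slice_to_natCast]
    by_cases h0 : (0 : Int) ∈ seg.take b <;> simp [h0]
  · rw [pvGain?_none black seg hm]
    simp [hm]

theorem pvClampIdx_of_nonneg (n : Nat) (a : Int) (ha : 0 ≤ a) :
    PySem.List.clampIdx n a = min a.toNat n := by
  unfold PySem.List.clampIdx
  split_ifs <;> omega

theorem pvSetSlice_explicit (xs : List Int) (a : Int) (b : Nat) (vals : List Int)
    (ha : 0 ≤ a) (hab : a.toNat + b ≤ xs.length) :
    pvSetSlice xs a (a + (b : Int)) vals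
      = xs.take a.toNat ++ vals ++ xs.drop (a.toNat + b) := by
  unfold pvSetSlice
  rw [pvClampIdx_of_nonneg _ _ ha, pvClampIdx_of_nonneg _ _ (by omega : (0:Int) ≤ a + b)]
  have h1 : min a.toNat xs.length = a.toNat := by omega
  have h2 : (a + (b : Int)).toNat = a.toNat + b := by omega
  have h3 : min (a.toNat + b) xs.length = a.toNat + b := by omega
  rw [h1, h2, h3]
  have h4 : max a.toNat (a.toNat + b) = a.toNat + b := by omega
  simp only [h4]

theorem pvFill_explicit (black a : Int) (b : Nat) (ln : List Int) (r : Int)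
    (ha : 0 ≤ a) (hab : a.toNat + b ≤ ln.length) :
    pvFillA black a (a + (b : Int)) (ln, r)
      = (ln.take a.toNat ++ List.replicate b black ++ ln.drop (a.toNat + b), r + (b : Int)) := by
  induction b with
  | zero =>
    unfold pvFillA
    rw [show a + ((0 : Nat) : Int) = a by push_cast; ring,
      PySem.List.pyRange_one_eq_nil (le_refl a)]
    simp
  | succ b ih =>
    have hab' : a.toNat + b ≤ ln.length := by omega
    unfold pvFillA
    rw [show a + ((b + 1 : Nat) : Int) = (a + (b : Int)) + 1 by push_cast; ring,
      PySem.List.pyRange_one_succ_right (by omega : a ≤ a + (b : Int)),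
      List.foldl_append]
    have hstep := ih hab'
    unfold pvFillA at hstep
    rw [hstep]
    simp only [List.foldl_cons, List.foldl_nil, Prod.mk.injEq]
    refine ⟨?_, ?_⟩
    · -- the list component
      rw [PySem.List.pySetD_of_nonneg _ _ (by omega : (0:Int) ≤ a + b)]
      have hidx : (a + (b : Int)).toNat = (ln.take a.toNat ++ List.replicate b black).length := by
        simp; omega
      rw [hidx, List.set_append_right _ _ (le_refl _), Nat.sub_self]
      have hdrop : ln.drop (a.toNat + b) = ln[a.toNat + b]! :: ln.drop (a.toNat + b + 1) := by
        rw [getElem!_pos ln (a.toNat + b) (by omega)]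
        exact List.drop_eq_getElem_cons (by omega)
      rw [hdrop]
      rw [List.replicate_succ' (n := b) (a := black)]
      simp [List.append_assoc]
      omega
    · push_cast; ring

theorem pvFwd_char (black i : Int) (ln : List Int) :
    ∀ (m : Nat) (j r : Int), ((ln.length : Int) - j).toNat = m → 0 ≤ j →
    pvFwdA i black (PySem.List.pyRange j (ln.length : Int) 1) (ln, r)
      = match pvGain? black (ln.drop j.toNat) with
        | some b => pvFillA black (i + 1) (j + (b : Int)) (ln, r)
        | none => (ln, r) := by
  intro m
  induction m using Nat.strong_induction_on with
  | _ m ih =>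
    intro j r hm hj0
    by_cases hjn : j < (ln.length : Int)
    · rw [PySem.List.pyRange_one_cons hjn]
      have hjlt : j.toNat < ln.length := by omega
      have hdrop : ln.drop j.toNat = ln[j.toNat] :: ln.drop (j.toNat + 1) :=
        List.drop_eq_getElem_cons hjlt
      have hget : PySem.List.pyGetD ln j 0 = ln[j.toNat] :=
        PySem.List.pyGetD_eq_getElem ln 0 hj0 hjn
      unfold pvFwdA
      simp only [hget]
      by_cases hb : ln[j.toNat] = black
      · rw [if_pos hb, hdrop]
        simp [pvGain?, hb]
      · rw [if_neg hb]
        by_cases h0 : ln[j.toNat] = 0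
        · rw [if_pos h0, hdrop]
          have hb0 : ¬ (0 : Int) = black := by rw [h0] at hb; exact hb
          simp [pvGain?, h0, hb0]
        · rw [if_neg h0]
          have hrec := ih ((ln.length : Int) - (j + 1)).toNat (by omega) (j + 1) r rfl (by omega)
          rw [hrec, hdrop]
          rw [show (j + 1).toNat = j.toNat + 1 by omega]
          rw [show pvGain? black (ln[j.toNat] :: ln.drop (j.toNat + 1))
              = (pvGain? black (ln.drop (j.toNat + 1))).map (· + 1) by simp [pvGain?, hb, h0]]
          cases pvGain? black (ln.drop (j.toNat + 1)) with
          | none => simp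
          | some b =>
            simp only [Option.map_some]
            rw [show j + ((b + 1 : Nat) : Int) = j + 1 + (b : Int) by push_cast; ring]
    · rw [PySem.List.pyRange_one_eq_nil (by omega : (ln.length : Int) ≤ j)]
      rw [List.drop_eq_nil_of_le (by omega : ln.length ≤ j.toNat)]
      simp [pvFwdA, pvGain?]

theorem pvBwd_char (black i : Int) (ln : List Int) (hn : i ≤ (ln.length : Int)) :
    ∀ (m : Nat) (j r : Int), (j + 1).toNat = m → j < i →
    pvBwdA i black (PySem.List.pyRange j (-1) (-1)) (ln, r)
      = match pvGain? black ((ln.take (j + 1).toNat).reverse) with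
        | some b => pvFillA black (j - (b : Int) + 1) i (ln, r)
        | none => (ln, r) := by
  intro m
  induction m using Nat.strong_induction_on with
  | _ m ih =>
    intro j r hm hji
    by_cases hj0 : 0 ≤ j
    · rw [PySem.List.pyRange_neg_one_cons (by omega : (-1 : Int) < j)]
      have hjlt : j.toNat < ln.length := by omega
      have htake : ln.take (j + 1).toNat = ln.take j.toNat ++ [ln[j.toNat]] := by
        rw [show (j + 1).toNat = j.toNat + 1 by omega]
        exact List.take_succ_eq_append_getElem hjlt
      have hrev : (ln.take (j + 1).toNat).reverse = ln[j.toNat] :: (ln.take j.toNat).reverse := by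
        rw [htake]; simp
      have hget : PySem.List.pyGetD ln j 0 = ln[j.toNat] :=
        PySem.List.pyGetD_eq_getElem ln 0 hj0 (by omega)
      unfold pvBwdA
      simp only [hget]
      by_cases hb : ln[j.toNat] = black
      · rw [if_pos hb, hrev]
        simp [pvGain?, hb]
      · rw [if_neg hb]
        by_cases h0 : ln[j.toNat] = 0
        · rw [if_pos h0, hrev]
          have hb0 : ¬ (0 : Int) = black := by rw [h0] at hb; exact hb
          simp [pvGain?, h0, hb0]
        · rw [if_neg h0]
          have hrec := ih j.toNat (by omega) (j - 1) r (by omega) (by omega)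
          rw [hrec, hrev]
          rw [show (j - 1 + 1).toNat = j.toNat by omega]
          rw [show pvGain? black (ln[j.toNat] :: (ln.take j.toNat).reverse)
              = (pvGain? black ((ln.take j.toNat).reverse)).map (· + 1) by simp [pvGain?, hb, h0]]
          cases pvGain? black ((ln.take j.toNat).reverse) with
          | none => simp
          | some b =>
            simp only [Option.map_some]
            rw [show j - ((b + 1 : Nat) : Int) + 1 = j - 1 - (b : Int) + 1 by push_cast; ring]
    · rw [PySem.List.pyRange_neg_one_eq_nil (by omega : j ≤ -1)]
      rw [show (j + 1).toNat = 0 by omega]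
      simp [pvBwdA, pvGain?]

theorem reverse_line_spec : Claim_equal_reverse_line := by
  intro line i black _hdom hpre
  obtain ⟨hi0, hilen⟩ := hpre
  unfold Spec_reverse_line reverse_line reverse_line_alt
  simp only [List.map_id']
  set ln := PySem.List.pySetD line i black with hln
  have hlen : ln.length = line.length := PySem.List.length_pySetD line i black
  have hseg1 : PySem.List.slice ln (some (i + 1)) none = ln.drop (i + 1).toNat :=
    PySem.List.slice_from ln (by omega)
  have hseg2 : (PySem.List.slice? (PySem.List.slice ln none (some i)) none none (-1)).getD []
      = (ln.take i.toNat).reverse := by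
    rw [PySem.List.slice_to ln hi0, PySem.List.slice?_none_none_neg_one]; rfl
  rw [hseg1, hseg2, pvGainB_eq, pvGainB_eq]
  have hfwd := pvFwd_char black i ln ((ln.length : Int) - (i + 1)).toNat (i + 1) 0 rfl (by omega)
  rw [hfwd]
  cases hc1 : pvGain? black (ln.drop (i + 1).toNat) with
  | some b =>
    have hb1 : b < ln.length - (i + 1).toNat := by
      have := pvGain?_lt black _ b hc1
      simpa using this
    have hbound1 : (i + 1).toNat + b ≤ ln.length := by omega
    have hfill1 := pvFill_explicit black (i + 1) b ln 0 (by omega) hbound1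
    have hslice1 := pvSetSlice_explicit ln (i + 1) b (List.replicate b black) (by omega) hbound1
    have hfnat : ((b : Int)).toNat = b := by omega
    simp only [Option.elim_some, hfnat]
    rw [hfill1, hslice1]
    set E1 : List Int := ln.take (i + 1).toNat ++ List.replicate b black ++ ln.drop ((i + 1).toNat + b) with hE1
    have hE1len : E1.length = ln.length := by
      rw [hE1]; simp; omega
    have hE1take : E1.take i.toNat = ln.take i.toNat := by
      rw [hE1, List.append_assoc,
        List.take_append_of_le_length (by simp; omega),
        List.take_take]
      congr 1; omega
    have hbwd := pvBwd_char black i E1 (by omega) (i - 1 + 1).toNat (i - 1) (0 + (b : Int)) rfl (by omega)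
    rw [show (i - 1 + 1).toNat = i.toNat by omega] at hbwd
    rw [hbwd, hE1take]
    cases hc2 : pvGain? black ((ln.take i.toNat).reverse) with
    | some c =>
      have hc2' : c < i.toNat := by
        have := pvGain?_lt black _ c hc2
        simp at this; omega
      have hgnat : ((c : Int)).toNat = c := by omega
      simp only [Option.elim_some, hgnat]
      have hfill2 := pvFill_explicit black (i - (c : Int)) c E1 (0 + (b : Int)) (by omega)
        (by rw [hE1len]; omega)
      rw [show i - (c : Int) + (c : Int) = i by ring] at hfill2
      have hslice2 := pvSetSlice_explicit E1 (i - (c : Int)) c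
        (List.replicate c black) (by omega) (by rw [hE1len]; omega)
      rw [show i - (c : Int) + (c : Int) = i by ring] at hslice2
      rw [show i - 1 - (c : Int) + 1 = i - (c : Int) by ring, hfill2, hslice2]
      all_goals (simp only [Prod.mk.injEq]; exact ⟨by trivial, by ring⟩)
    | none =>
      simp only [Option.elim_none]
      have hslice2 := pvSetSlice_explicit E1 (i - (0 : Int)) 0 (List.replicate 0 black)
        (by omega) (by rw [hE1len]; omega)
      rw [show i - (0 : Int) + ((0 : Nat) : Int) = i by push_cast; ring] at hslice2
      rw [show i - (0 : Int) = i by ring] at hslice2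
      rw [show ((0 : Int)).toNat = 0 by rfl]
      rw [show i - (0 : Int) = i by ring, hslice2]
      simp
  | none =>
    simp only [Option.elim_none]
    have hslice1 := pvSetSlice_explicit ln (i + 1) 0 (List.replicate 0 black) (by omega)
      (by omega)
    rw [show i + 1 + ((0 : Nat) : Int) = i + 1 by push_cast; ring] at hslice1
    rw [show ((0 : Int)).toNat = 0 by rfl]
    rw [show i + 1 + (0 : Int) = i + 1 by ring, hslice1]
    simp only [List.replicate_zero, List.append_nil, Nat.add_zero,
      List.take_append_drop]
    have hbwd := pvBwd_char black i ln (by omega) (i - 1 + 1).toNat (i - 1) 0 rfl (by omega)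
    rw [show (i - 1 + 1).toNat = i.toNat by omega] at hbwd
    rw [hbwd]
    cases hc2 : pvGain? black ((ln.take i.toNat).reverse) with
    | some c =>
      have hc2' : c < i.toNat := by
        have := pvGain?_lt black _ c hc2
        simp at this; omega
      have hgnat : ((c : Int)).toNat = c := by omega
      simp only [Option.elim_some, hgnat]
      have hfill2 := pvFill_explicit black (i - (c : Int)) c ln 0 (by omega) (by omega)
      rw [show i - (c : Int) + (c : Int) = i by ring] at hfill2
      have hslice2 := pvSetSlice_explicit ln (i - (c : Int)) c
        (List.replicate c black) (by omega) (by omega)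
      rw [show i - (c : Int) + (c : Int) = i by ring] at hslice2
      rw [show i - 1 - (c : Int) + 1 = i - (c : Int) by ring, hfill2, hslice2]
    | none =>
      simp only [Option.elim_none]
      have hslice2 := pvSetSlice_explicit ln (i - (0 : Int)) 0 (List.replicate 0 black)
        (by omega) (by omega)
      rw [show i - (0 : Int) + ((0 : Nat) : Int) = i by push_cast; ring] at hslice2
      rw [show i - (0 : Int) = i by ring] at hslice2
      rw [show ((0 : Int)).toNat = 0 by rfl]
      rw [show i - (0 : Int) = i by ring, hslice2]
      simp
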